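-- pv_equiv track=rewrite | github.com/yannickloth/W33-Theory | pillars/THEORY_PART_CXLII_27_COCLIQUE.py | verify_srg_parameters
-- ===== SOURCE A (Python) =====
-- def verify_srg_parameters(adj_matrix, n):
--     """Check what SRG parameters the graph has"""
--     # Check regularity
--     degrees = [sum(row) for row in adj_matrix]
--     k = degrees[0] if len(set(degrees)) == 1 else None
--
--     if k is None:
--         return None, f"Not regular: degrees {set(degrees)}"
--
--     # Compute λ (common neighbors of adjacent vertices)
--     lambda_counts = []
--     for i in range(n):
--         for j in range(i + 1, n):
--             if adj_matrix[i][j]: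
--                 common = sum(adj_matrix[i][l] and adj_matrix[j][l] for l in range(n))
--                 lambda_counts.append(common)
--
--     lam = lambda_counts[0] if lambda_counts and len(set(lambda_counts)) == 1 else None
--
--     # Compute μ (common neighbors of non-adjacent vertices)
--     mu_counts = []
--     for i in range(n):
--         for j in range(i + 1, n):
--             if not adj_matrix[i][j]:
--                 common = sum(adj_matrix[i][l] and adj_matrix[j][l] for l in range(n))
--                 mu_counts.append(common)
--
--     mu = mu_counts[0] if mu_counts and len(set(mu_counts)) == 1 else None
--
--     if lam is not None and mu is not None:
--         return (n, k, lam, mu), "SRG verified"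
--     return (
--         None,
--         f"λ values: {set(lambda_counts) if lambda_counts else 'N/A'}, μ values: {set(mu_counts) if mu_counts else 'N/A'}",
--     )
-- ===== SOURCE B (Python) =====
-- def verify_srg_parameters(adj_matrix, n):
--     """Check what SRG parameters the graph has"""
--     # Regularity via extrema instead of building a set
--     degrees = [sum(row) for row in adj_matrix]
--     if not degrees or min(degrees) != max(degrees):
--         return None, f"Not regular: degrees {set(degrees)}"
--     k = degrees[0]
--
--     # Adjacency lists: the truthy column indices of each of the first n rows.
--     nbrs = [[l for l in range(n) if adj_matrix[i][l]] for i in range(n)]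
--
--     # One fused pass over pairs i < j: adjacency decided by membership in the
--     # neighbor list, common-neighbor count as a sparse sum over that list.
--     lambda_counts, mu_counts = [], []
--     for i in range(n):
--         for j in range(i + 1, n):
--             common = sum(adj_matrix[j][l] for l in nbrs[i])
--             (lambda_counts if j in nbrs[i] else mu_counts).append(common)
--
--     lam = lambda_counts[0] if lambda_counts and len(set(lambda_counts)) == 1 else None
--     mu = mu_counts[0] if mu_counts and len(set(mu_counts)) == 1 else None
--
--     if lam is not None and mu is not None:
--         return (n, k, lam, mu), "SRG verified"
--     return (
--         None,
--         f"λ values: {set(lambda_counts) if lambda_counts else 'N/A'}, μ values: {set(mu_counts) if mu_counts else 'N/A'}",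
--     )
-- ===== Notes on version B (the rewrite author's own statement) =====
-- stated objective: alternative
-- what changed: B replaces A's two matrix-scanning double loops by an adjacency-list representation built once (the truthy column indices of each row); a single fused pass over pairs i<j then decides adjacency by membership in the neighbor list and computes each common-neighbor count as a sparse sum over that list instead of A's truthiness scan over all n columns, and regularity is tested with min==max instead of a set.
-- outside the precondition, e.g. on verify_srg_parameters([[0, 0], [0]], 2): A returns (None, 'λ values: N/A, μ values: {0}'), B raises IndexError
import Mathlib
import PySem

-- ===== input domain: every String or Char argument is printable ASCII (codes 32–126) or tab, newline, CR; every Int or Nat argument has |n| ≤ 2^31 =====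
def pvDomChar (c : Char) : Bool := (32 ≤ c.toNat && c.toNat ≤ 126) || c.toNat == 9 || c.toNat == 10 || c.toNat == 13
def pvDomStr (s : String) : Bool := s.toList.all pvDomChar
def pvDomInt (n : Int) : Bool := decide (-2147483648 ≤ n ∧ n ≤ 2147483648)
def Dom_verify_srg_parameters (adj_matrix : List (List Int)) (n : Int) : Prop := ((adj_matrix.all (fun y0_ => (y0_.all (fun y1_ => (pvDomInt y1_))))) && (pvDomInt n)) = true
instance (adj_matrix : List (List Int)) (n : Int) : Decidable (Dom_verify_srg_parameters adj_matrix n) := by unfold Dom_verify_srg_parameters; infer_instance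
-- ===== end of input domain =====

-- B replaces A's two matrix-scanning double loops by adjacency lists built once; a single fused
-- pass over pairs i<j decides adjacency by membership in the neighbor list and sums sparsely over
-- it, and tests regularity with min==max instead of a set (objective: alternative, same cost).

-- ===== shared helper: repr(set(xs)) for a list of ints =====
-- Both Pythons format f"{set(...)}" in their messages.  PySem does not model Python's set iteration
-- order, so the helpers below are a hand port, step for step, of CPython's setobject.c for int
-- elements (hash(n) = n mod 2^61-1 with the sign of n, hash = -2 for -1; open addressing with
-- LINEAR_PROBES = 9, perturb shift 5, initial table size 8, resize to used*4 (used*2 above 50000)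
-- when fill*5 >= mask*3; repr lists occupied slots in table order).  Exact for int elements — checked
-- against CPython 3.11 on randomized lists.  The probe loop always terminates (the table always has
-- an empty slot); the fuel given (64 per slot) is far more than the probe sequence can ever need.
def pyHashInt (v : Int) : Int :=
  let r : Int := if 0 ≤ v then v % 2305843009213693951 else -((-v) % 2305843009213693951)
  if r = -1 then -2 else r

def pySetHash64 (hv : Int) : Nat := (PySem.Int.band hv 18446744073709551615).toNat

inductive PvProbeRes where
  | empty : Nat → PvProbeRes
  | present : PvProbeRes
  | next : PvProbeRes

-- scan slots i, i+1, …, i+cnt-1 for v (hash hv): first empty slot, or "already present"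
def pySetScanRow (table : List (Option Int)) (v : Int) (hv : Int) : Nat → Nat → PvProbeRes
  | _, 0 => .next
  | i, cnt+1 =>
    match table.getD i none with
    | none => .empty i
    | some w => if pyHashInt w = hv ∧ w = v then .present else pySetScanRow table v hv (i+1) cnt

-- CPython's probe sequence: some (some s) = insert at slot s, some none = already present
def pySetFindSlot (table : List (Option Int)) (size : Nat) (v : Int) (hv : Int) :
    Nat → Nat → Nat → Option (Option Nat)
  | _, _, 0 => none
  | i, perturb, fuel+1 =>
    let probes := if i + 10 ≤ size then 9 else 0
    match pySetScanRow table v hv i (probes+1) with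
    | .empty s => some (some s)
    | .present => some none
    | .next =>
      let perturb' := perturb >>> 5
      pySetFindSlot table size v hv ((i*5 + 1 + perturb') % size) perturb' fuel

-- newsize = 8; while newsize <= minused: newsize <<= 1
def pySetGrow (minused : Nat) : Nat → Nat → Nat
  | sz, 0 => sz
  | sz, fuel+1 => if sz ≤ minused then pySetGrow minused (sz*2) fuel else sz

def pySetInsertClean (t : List (Option Int)) (w : Int) : List (Option Int) :=
  let hv := pyHashInt w
  let p0 := pySetHash64 hv
  match pySetFindSlot t t.length w hv (p0 % t.length) p0 (t.length * 64 + 64) with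
  | some (some s) => t.set s (some w)
  | _ => t

def pySetAdd (st : List (Option Int) × Nat) (v : Int) : List (Option Int) × Nat :=
  let table := st.1
  let fill := st.2
  let size := table.length
  let hv := pyHashInt v
  let p0 := pySetHash64 hv
  match pySetFindSlot table size v hv (p0 % size) p0 (size * 64 + 64) with
  | some (some s) =>
    let table := table.set s (some v)
    let fill := fill + 1
    if fill * 5 < (size - 1) * 3 then (table, fill)
    else
      let minused := if fill > 50000 then fill * 2 else fill * 4
      let newsize := pySetGrow minused 8 64
      (table.foldl (fun t e => match e with | some w => pySetInsertClean t w | none => t)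
        (List.replicate newsize none), fill)
  | _ => (table, fill)

def pyIntSetRepr (xs : List Int) : String :=
  let st := xs.foldl pySetAdd (List.replicate 8 none, 0)
  let items := st.1.filterMap id
  if items = [] then "set()"
  else "{" ++ PySem.Str.join ", " (items.map PySem.Int.toStr) ++ "}"

-- ===== PORT A =====
def verify_srg_parameters (adj_matrix : List (List Int)) (n : Int) : (Option (Int × Int × Int × Int)) × String :=
  let degrees := adj_matrix.map (fun row => row.sum)
  let k : Option Int :=
    if (PySem.Set.ofList degrees).length = 1 then some (degrees.headD 0) else none
  match k with
  | none => (none, "Not regular: degrees " ++ pyIntSetRepr degrees)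
  | some k =>
    let lambda_counts : List Int :=
      (PySem.List.pyRange 0 n 1).foldl (fun acc i =>
        (PySem.List.pyRange (i+1) n 1).foldl (fun acc j =>
          if PySem.List.pyGetD (PySem.List.pyGetD adj_matrix i []) j 0 ≠ 0 then
            acc ++ [((PySem.List.pyRange 0 n 1).map (fun l =>
              if PySem.List.pyGetD (PySem.List.pyGetD adj_matrix i []) l 0 = 0 then
                PySem.List.pyGetD (PySem.List.pyGetD adj_matrix i []) l 0
              else PySem.List.pyGetD (PySem.List.pyGetD adj_matrix j []) l 0)).sum]
          else acc) acc) []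
    let lam : Option Int :=
      if lambda_counts ≠ [] ∧ (PySem.Set.ofList lambda_counts).length = 1 then
        some (lambda_counts.headD 0) else none
    let mu_counts : List Int :=
      (PySem.List.pyRange 0 n 1).foldl (fun acc i =>
        (PySem.List.pyRange (i+1) n 1).foldl (fun acc j =>
          if PySem.List.pyGetD (PySem.List.pyGetD adj_matrix i []) j 0 = 0 then
            acc ++ [((PySem.List.pyRange 0 n 1).map (fun l =>
              if PySem.List.pyGetD (PySem.List.pyGetD adj_matrix i []) l 0 = 0 then
                PySem.List.pyGetD (PySem.List.pyGetD adj_matrix i []) l 0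
              else PySem.List.pyGetD (PySem.List.pyGetD adj_matrix j []) l 0)).sum]
          else acc) acc) []
    let mu : Option Int :=
      if mu_counts ≠ [] ∧ (PySem.Set.ofList mu_counts).length = 1 then
        some (mu_counts.headD 0) else none
    match lam, mu with
    | some lam, some mu => (some (n, k, lam, mu), "SRG verified")
    | _, _ =>
      (none, "λ values: " ++ (if lambda_counts ≠ [] then pyIntSetRepr lambda_counts else "N/A")
        ++ ", μ values: " ++ (if mu_counts ≠ [] then pyIntSetRepr mu_counts else "N/A"))

-- ===== PORT B =====
def verify_srg_parameters_alt (adj_matrix : List (List Int)) (n : Int) : (Option (Int × Int × Int × Int)) × String :=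
  let degrees := adj_matrix.map (fun row => row.sum)
  if degrees = [] ∨ PySem.List.min? degrees (fun x => x) ≠ PySem.List.max? degrees (fun x => x) then
    (none, "Not regular: degrees " ++ pyIntSetRepr degrees)
  else
    let k := degrees.headD 0
    -- adjacency lists: truthy column indices of each of the first n rows
    let nbrs : List (List Int) := (PySem.List.pyRange 0 n 1).map (fun i =>
      (PySem.List.pyRange 0 n 1).filter (fun l =>
        decide (PySem.List.pyGetD (PySem.List.pyGetD adj_matrix i []) l 0 ≠ 0)))
    -- one fused pass over pairs i < j
    let counts : List Int × List Int :=
      (PySem.List.pyRange 0 n 1).foldl (fun acc i =>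
        (PySem.List.pyRange (i+1) n 1).foldl (fun acc j =>
          let nb := PySem.List.pyGetD nbrs i []
          let common := (nb.map (fun l =>
            PySem.List.pyGetD (PySem.List.pyGetD adj_matrix j []) l 0)).sum
          if j ∈ nb then (acc.1 ++ [common], acc.2) else (acc.1, acc.2 ++ [common])) acc)
        ([], [])
    let lambda_counts := counts.1
    let mu_counts := counts.2
    let lam : Option Int :=
      if lambda_counts ≠ [] ∧ (PySem.Set.ofList lambda_counts).length = 1 then
        some (lambda_counts.headD 0) else none
    let mu : Option Int :=
      if mu_counts ≠ [] ∧ (PySem.Set.ofList mu_counts).length = 1 then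
        some (mu_counts.headD 0) else none
    match lam, mu with
    | some lam, some mu => (some (n, k, lam, mu), "SRG verified")
    | _, _ =>
      (none, "λ values: " ++ (if lambda_counts ≠ [] then pyIntSetRepr lambda_counts else "N/A")
        ++ ", μ values: " ++ (if mu_counts ≠ [] then pyIntSetRepr mu_counts else "N/A"))

-- ===== PRECONDITION & SPEC =====
-- Pre_ excludes exactly the inputs on which Python B raises IndexError while A may still return:
-- a regular nonempty matrix with n ≥ 1 whose first n rows are not all of length ≥ n (or fewer than
-- n rows).  A only avoids the same IndexError there because `and` short-circuits past entries it
-- never reads; B's adjacency lists read every entry adj_matrix[i][l], i, l < n, once.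
def Pre_verify_srg_parameters (adj_matrix : List (List Int)) (n : Int) : Prop :=
  (adj_matrix ≠ [] ∧ ∀ row ∈ adj_matrix, row.sum = (adj_matrix.headD []).sum) →
  1 ≤ n →
  (n ≤ (adj_matrix.length : Int) ∧
   ∀ i ∈ List.range n.toNat, n ≤ ((adj_matrix.getD i []).length : Int))
instance (adj_matrix : List (List Int)) (n : Int) : Decidable (Pre_verify_srg_parameters adj_matrix n) := by unfold Pre_verify_srg_parameters; infer_instance

def pvWitness_verify_srg_parameters : List (List Int) × Int :=
  ([[0,1,0,0,1],[1,0,1,0,0],[0,1,0,1,0],[0,0,1,0,1],[1,0,0,1,0]], 5)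

def Spec_verify_srg_parameters (adj_matrix : List (List Int)) (n : Int) (out : (Option (Int × Int × Int × Int)) × String) : Prop := out = verify_srg_parameters_alt adj_matrix n
instance (adj_matrix : List (List Int)) (n : Int) (out : (Option (Int × Int × Int × Int)) × String) : Decidable (Spec_verify_srg_parameters adj_matrix n out) := by unfold Spec_verify_srg_parameters; infer_instance

-- ===== CLAIM (what is proved, stated in full; the proofs are below) =====
def Claim_equal_verify_srg_parameters : Prop := ∀ (adj_matrix : List (List Int)) (n : Int), Dom_verify_srg_parameters adj_matrix n → Pre_verify_srg_parameters adj_matrix n → Spec_verify_srg_parameters adj_matrix n (verify_srg_parameters adj_matrix n)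

-- ===== LEMMAS AND PROOFS =====

theorem add_of_all_eq (t : List Int) (x : Int) (h : ∀ b ∈ t, b = x) :
    t.foldl PySem.Set.add [x] = [x] := by
  induction t with
  | nil => rfl
  | cons b s ih =>
    have hb : b = x := h b (by simp)
    subst hb
    rw [List.foldl_cons]
    have hx : PySem.Set.add [b] b = [b] := by simp [PySem.Set.add, PySem.Set.contains]
    rw [hx]
    exact ih (fun c hc => h c (by simp [hc]))

-- set(xs) has one element iff xs is nonempty with all elements equal to its head
theorem ofList_len_one_iff (xs : List Int) :
    (PySem.Set.ofList xs).length = 1 ↔ xs ≠ [] ∧ ∀ b ∈ xs, b = xs.headD 0 := by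
  cases xs with
  | nil => simp [PySem.Set.ofList]
  | cons x t =>
    constructor
    · intro h
      refine ⟨by simp, ?_⟩
      obtain ⟨a, ha⟩ := List.length_eq_one_iff.mp h
      have hx : x ∈ PySem.Set.ofList (x :: t) := by rw [PySem.Set.mem_ofList]; simp
      rw [ha] at hx
      simp at hx
      intro b hb
      have hbm : b ∈ PySem.Set.ofList (x :: t) := by rw [PySem.Set.mem_ofList]; exact hb
      rw [ha] at hbm
      simp at hbm
      simp [hbm, hx]
    · rintro ⟨-, h⟩
      have hfold : PySem.Set.ofList (x :: t) = [x] := by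
        show (x :: t).foldl PySem.Set.add [] = [x]
        rw [List.foldl_cons]
        exact add_of_all_eq t x (fun b hb => h b (by simp [hb]))
      simp [hfold]

-- A's regularity test (len(set(degrees)) == 1) iff B's (degrees and min(degrees) == max(degrees))
theorem k_cond_iff (xs : List Int) :
    (PySem.Set.ofList xs).length = 1 ↔
      ¬(xs = [] ∨ PySem.List.min? xs (fun x => x) ≠ PySem.List.max? xs (fun x => x)) := by
  rw [ofList_len_one_iff, not_or, not_not]
  constructor
  · rintro ⟨hne, h⟩
    refine ⟨hne, ?_⟩
    cases hm : PySem.List.min? xs (fun x => x) with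
    | none => exact absurd ((PySem.List.min?_eq_none_iff xs _).mp hm) hne
    | some m =>
      cases hM : PySem.List.max? xs (fun x => x) with
      | none => exact absurd ((PySem.List.max?_eq_none_iff xs _).mp hM) hne
      | some M =>
        have hmx : m = xs.headD 0 := h m (PySem.List.min?_mem hm)
        have hMx : M = xs.headD 0 := h M (PySem.List.max?_mem hM)
        rw [hmx, hMx]
  · rintro ⟨hne, h⟩
    refine ⟨hne, ?_⟩
    cases hm : PySem.List.min? xs (fun x => x) with
    | none => exact absurd ((PySem.List.min?_eq_none_iff xs _).mp hm) hne
    | some m =>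
      have hM : PySem.List.max? xs (fun x => x) = some m := by rw [← h, hm]
      have hhead : xs.headD 0 ∈ xs := by
        cases xs with
        | nil => exact absurd rfl hne
        | cons x t => simp
      have hbm : ∀ b ∈ xs, b = m := by
        intro b hb
        have h1 := PySem.List.min?_isMin hm b hb
        have h2 := PySem.List.max?_isMax hM b hb
        omega
      intro b hb
      rw [hbm b hb, hbm _ hhead]

-- B's fused classifying pass over one inner list = the two filtered passes, componentwise
theorem foldl_split (js : List Int) (C : Int → Prop) [DecidablePred C] (f : Int → Int)
    (acc : List Int × List Int) :
    js.foldl (fun acc j =>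
        if C j then (acc.1 ++ [f j], acc.2) else (acc.1, acc.2 ++ [f j])) acc
      = (js.foldl (fun a j => if C j then a ++ [f j] else a) acc.1,
         js.foldl (fun a j => if C j then a else a ++ [f j]) acc.2) := by
  induction js generalizing acc with
  | nil => rfl
  | cons j t ih => by_cases h : C j <;> simp [h, ih]

-- … and over the whole nested pair loop
theorem foldl_pairs_split (is : List Int) (J : Int → List Int) (C : Int → Int → Prop)
    [∀ i j, Decidable (C i j)] (f : Int → Int → Int) (acc : List Int × List Int) :
    is.foldl (fun acc i => (J i).foldl (fun acc j =>
        if C i j then (acc.1 ++ [f i j], acc.2) else (acc.1, acc.2 ++ [f i j])) acc) acc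
      = (is.foldl (fun a i => (J i).foldl (fun a j => if C i j then a ++ [f i j] else a) a) acc.1,
         is.foldl (fun a i => (J i).foldl (fun a j => if C i j then a else a ++ [f i j]) a) acc.2) := by
  induction is generalizing acc with
  | nil => rfl
  | cons i t ih => rw [List.foldl_cons, foldl_split, ih]; rfl

-- Python's `sum(a and b for …)` (a and b = a when a is falsy, i.e. 0) equals B's sparse sum
theorem sum_and_eq_sum_filter (js : List Int) (a b : Int → Int) :
    (js.map (fun l => if a l = 0 then a l else b l)).sum
      = ((js.filter (fun l => decide (a l ≠ 0))).map b).sum := by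
  induction js with
  | nil => rfl
  | cons j t ih => by_cases h : a j = 0 <;> simp [h, ih]

-- B's fused pair loop over the adjacency lists = (A's λ loop, A's μ loop)
theorem counts_eq (m : List (List Int)) (n : Int) :
    (PySem.List.pyRange 0 n 1).foldl (fun acc i =>
      (PySem.List.pyRange (i+1) n 1).foldl (fun acc j =>
        if j ∈ PySem.List.pyGetD ((PySem.List.pyRange 0 n 1).map (fun i =>
              (PySem.List.pyRange 0 n 1).filter (fun l =>
                decide (PySem.List.pyGetD (PySem.List.pyGetD m i []) l 0 ≠ 0)))) i [] then
          (acc.1 ++ [((PySem.List.pyGetD ((PySem.List.pyRange 0 n 1).map (fun i =>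
              (PySem.List.pyRange 0 n 1).filter (fun l =>
                decide (PySem.List.pyGetD (PySem.List.pyGetD m i []) l 0 ≠ 0)))) i []).map (fun l =>
              PySem.List.pyGetD (PySem.List.pyGetD m j []) l 0)).sum], acc.2)
        else
          (acc.1, acc.2 ++ [((PySem.List.pyGetD ((PySem.List.pyRange 0 n 1).map (fun i =>
              (PySem.List.pyRange 0 n 1).filter (fun l =>
                decide (PySem.List.pyGetD (PySem.List.pyGetD m i []) l 0 ≠ 0)))) i []).map (fun l =>
              PySem.List.pyGetD (PySem.List.pyGetD m j []) l 0)).sum])) acc) ([], [])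
    = ((PySem.List.pyRange 0 n 1).foldl (fun acc i =>
        (PySem.List.pyRange (i+1) n 1).foldl (fun acc j =>
          if PySem.List.pyGetD (PySem.List.pyGetD m i []) j 0 ≠ 0 then
            acc ++ [((PySem.List.pyRange 0 n 1).map (fun l =>
              if PySem.List.pyGetD (PySem.List.pyGetD m i []) l 0 = 0 then
                PySem.List.pyGetD (PySem.List.pyGetD m i []) l 0
              else PySem.List.pyGetD (PySem.List.pyGetD m j []) l 0)).sum]
          else acc) acc) [],
       (PySem.List.pyRange 0 n 1).foldl (fun acc i =>
        (PySem.List.pyRange (i+1) n 1).foldl (fun acc j =>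
          if PySem.List.pyGetD (PySem.List.pyGetD m i []) j 0 = 0 then
            acc ++ [((PySem.List.pyRange 0 n 1).map (fun l =>
              if PySem.List.pyGetD (PySem.List.pyGetD m i []) l 0 = 0 then
                PySem.List.pyGetD (PySem.List.pyGetD m i []) l 0
              else PySem.List.pyGetD (PySem.List.pyGetD m j []) l 0)).sum]
          else acc) acc) []) := by
  rw [foldl_pairs_split]
  refine Prod.ext ?_ ?_ <;> simp only []
  · apply PySem.List.foldl_congr_mem
    intro acc i hi
    obtain ⟨hi0, hin⟩ := PySem.List.mem_pyRange_one.mp hi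
    rw [PySem.List.pyGetD_map_pyRange_of_nonneg _ n i _ hi0 hin]
    apply PySem.List.foldl_congr_mem
    intro a j hj
    obtain ⟨hj1, hj2⟩ := PySem.List.mem_pyRange_one.mp hj
    have hmem : (j ∈ (PySem.List.pyRange 0 n 1).filter (fun l =>
        decide (PySem.List.pyGetD (PySem.List.pyGetD m i []) l 0 ≠ 0)))
        ↔ PySem.List.pyGetD (PySem.List.pyGetD m i []) j 0 ≠ 0 := by
      simp [List.mem_filter, PySem.List.mem_pyRange_one]
      intro _; omega
    rw [if_congr hmem (by rw [← sum_and_eq_sum_filter]) rfl]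
  · apply PySem.List.foldl_congr_mem
    intro acc i hi
    obtain ⟨hi0, hin⟩ := PySem.List.mem_pyRange_one.mp hi
    rw [PySem.List.pyGetD_map_pyRange_of_nonneg _ n i _ hi0 hin]
    apply PySem.List.foldl_congr_mem
    intro a j hj
    obtain ⟨hj1, hj2⟩ := PySem.List.mem_pyRange_one.mp hj
    have hmem : (j ∈ (PySem.List.pyRange 0 n 1).filter (fun l =>
        decide (PySem.List.pyGetD (PySem.List.pyGetD m i []) l 0 ≠ 0)))
        ↔ ¬(PySem.List.pyGetD (PySem.List.pyGetD m i []) j 0 = 0) := by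
      simp [List.mem_filter, PySem.List.mem_pyRange_one]
      intro _; omega
    rw [if_congr hmem rfl (by rw [← sum_and_eq_sum_filter]), ite_not]

theorem main_eq (m : List (List Int)) (n : Int) :
    verify_srg_parameters m n = verify_srg_parameters_alt m n := by
  simp only [verify_srg_parameters, verify_srg_parameters_alt]
  rw [if_congr (k_cond_iff (m.map fun row => row.sum)) rfl rfl]
  by_cases hQ : ((m.map fun row => row.sum) = [] ∨
      PySem.List.min? (m.map fun row => row.sum) (fun x => x) ≠
      PySem.List.max? (m.map fun row => row.sum) (fun x => x))
  · rw [if_neg (not_not_intro hQ), if_pos hQ]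
  · rw [if_pos hQ, if_neg hQ]
    simp only [counts_eq m n]

-- ===== VERDICT (by name: the statement is the Claim_ definition above) =====
theorem verify_srg_parameters_spec : Claim_equal_verify_srg_parameters := by
  intro adj_matrix n _ _
  unfold Spec_verify_srg_parameters
  exact main_eq adj_matrix n
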